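-- pv_equiv track=rewrite | github.com/Sstilva/data_collector | app/src/base_writer.py | _form_seller
-- ===== SOURCE A (Python) =====
-- def _form_seller(headers: list, raw: list) -> list:
--     clean = []
--     stop = False
--
--     for seller in raw:
--         if (seller) and (not stop):
--             for _ in headers:
--                 if _ in seller.keys():
--                     clean.append(seller[_])
--                     stop = True
--                 else:
--                     clean.append(None)
--
--     return clean
-- ===== SOURCE B (Python) =====
-- def _form_seller(headers: list, raw: list) -> list:
--     sellers = [s for s in raw if s]
--     idx = next((i for i, s in enumerate(sellers)
--                 if any(h in s for h in headers)), len(sellers))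
--     return [s.get(h) for s in sellers[:idx + 1] for h in headers]
-- ===== Notes on version B (the rewrite author's own statement) =====
-- stated objective: simpler
-- what changed: Replaces the single interleaved pass with a stop flag by a three-step decomposition: filter truthy sellers, find the index of the first seller matching any header, then flatten the prefix up to it with one comprehension of dict.get lookups.
import Mathlib
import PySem

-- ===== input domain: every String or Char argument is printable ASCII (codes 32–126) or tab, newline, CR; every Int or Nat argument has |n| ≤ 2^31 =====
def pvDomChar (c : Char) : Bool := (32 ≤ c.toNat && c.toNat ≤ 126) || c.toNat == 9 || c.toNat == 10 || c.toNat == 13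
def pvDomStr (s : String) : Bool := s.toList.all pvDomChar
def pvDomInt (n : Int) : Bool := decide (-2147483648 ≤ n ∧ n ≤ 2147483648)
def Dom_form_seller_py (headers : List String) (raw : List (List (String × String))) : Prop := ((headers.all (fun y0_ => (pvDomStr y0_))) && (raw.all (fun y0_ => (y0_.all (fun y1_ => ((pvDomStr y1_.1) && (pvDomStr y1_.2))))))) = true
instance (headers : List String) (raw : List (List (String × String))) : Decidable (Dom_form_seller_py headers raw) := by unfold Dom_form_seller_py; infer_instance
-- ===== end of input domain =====

-- B replaces A's interleaved stop-flag pass by: filter truthy sellers, locate the first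
-- matching seller's index, then flatten that prefix with dict.get lookups (objective: simpler).


-- ===== PORT A =====
-- inner loop: for _ in headers: append seller[_] or None, set stop on a hit
def fsInnerA (seller : List (String × String)) : List String → Bool → List (Option String) × Bool
  | [], stop => ([], stop)
  | h :: hs, stop =>
    match (PySem.Dict.mk seller).get? h with
    | some v => let r := fsInnerA seller hs true; (some v :: r.1, r.2)
    | none   => let r := fsInnerA seller hs stop; (none :: r.1, r.2)

-- outer loop: for seller in raw, guarded by (seller) and (not stop)
def fsOuterA (headers : List String) : List (List (String × String)) → Bool → List (Option String)
  | [], _ => []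
  | s :: rest, stop =>
    if s ≠ [] ∧ stop = false then
      let r := fsInnerA s headers false
      r.1 ++ fsOuterA headers rest r.2
    else
      fsOuterA headers rest stop

def form_seller_py (headers : List String) (raw : List (List (String × String))) : List (Option String) :=
  fsOuterA headers raw false

-- ===== PORT B =====
def form_seller_py_alt (headers : List String) (raw : List (List (String × String))) : List (Option String) :=
  let sellers := raw.filter (fun s => ¬ s.isEmpty)
  let idx := match sellers.findIdx? (fun s => headers.any (fun h => ((PySem.Dict.mk s).get? h).isSome)) with
             | some i => i
             | none => sellers.length
  (sellers.take (idx + 1)).flatMap (fun s => headers.map (fun h => (PySem.Dict.mk s).get? h))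

-- ===== PRECONDITION & SPEC =====
def Spec_form_seller_py (headers : List String) (raw : List (List (String × String))) (out : List (Option String)) : Prop := out = form_seller_py_alt headers raw
instance (headers : List String) (raw : List (List (String × String))) (out : List (Option String)) : Decidable (Spec_form_seller_py headers raw out) := by unfold Spec_form_seller_py; infer_instance

-- ===== CLAIM (what is proved, stated in full; the proofs are below) =====
def Claim_equal_form_seller_py : Prop := ∀ (headers : List String) (raw : List (List (String × String))), Dom_form_seller_py headers raw → Spec_form_seller_py headers raw (form_seller_py headers raw)

-- ===== LEMMAS AND PROOFS =====

-- the inner loop produces all the lookups and ORs the hits into the flag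
theorem fsInnerA_eq (seller : List (String × String)) (hs : List String) (stop : Bool) :
    fsInnerA seller hs stop =
      (hs.map (fun h => (PySem.Dict.mk seller).get? h),
       stop || hs.any (fun h => ((PySem.Dict.mk seller).get? h).isSome)) := by
  induction hs generalizing stop with
  | nil => simp [fsInnerA]
  | cons h t ih =>
    cases hg : (PySem.Dict.mk seller).get? h with
    | none => simp [fsInnerA, hg, ih]
    | some v => simp [fsInnerA, hg, ih]

-- once the flag is set the outer loop appends nothing
theorem fsOuterA_true (headers : List String) (raw : List (List (String × String))) :
    fsOuterA headers raw true = [] := by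
  induction raw with
  | nil => rfl
  | cons s rest ih => simp [fsOuterA, ih]

-- recursive characterisation of B's take-prefix-and-flatten
def fsAltGo (headers : List String) : List (List (String × String)) → List (Option String)
  | [] => []
  | s :: rest =>
    headers.map (fun h => (PySem.Dict.mk s).get? h) ++
      (if headers.any (fun h => ((PySem.Dict.mk s).get? h).isSome) then [] else fsAltGo headers rest)

theorem fsAlt_eq_go (headers : List String) (sellers : List (List (String × String))) :
    ((sellers.take
        ((match sellers.findIdx? (fun s => headers.any (fun h => ((PySem.Dict.mk s).get? h).isSome)) with
          | some i => i
          | none => sellers.length) + 1)).flatMap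
      (fun s => headers.map (fun h => (PySem.Dict.mk s).get? h))) = fsAltGo headers sellers := by
  induction sellers with
  | nil => rfl
  | cons s rest ih =>
    by_cases hp : headers.any (fun h => ((PySem.Dict.mk s).get? h).isSome)
    · simp [List.findIdx?_cons, hp, fsAltGo]
    · simp only [List.findIdx?_cons, hp, Bool.false_eq_true, if_false, fsAltGo]
      cases hf : rest.findIdx? (fun s => headers.any (fun h => ((PySem.Dict.mk s).get? h).isSome)) with
      | none => simpa [hf, List.flatMap_cons] using congrArg (headers.map (fun h => (PySem.Dict.mk s).get? h) ++ ·) (by simpa [hf] using ih)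
      | some i => simpa [hf, List.flatMap_cons] using congrArg (headers.map (fun h => (PySem.Dict.mk s).get? h) ++ ·) (by simpa [hf] using ih)

theorem fsOuter_eq_go (headers : List String) (raw : List (List (String × String))) :
    fsOuterA headers raw false = fsAltGo headers (raw.filter (fun s => ¬ s.isEmpty)) := by
  induction raw with
  | nil => simp [fsOuterA, fsAltGo]
  | cons s rest ih =>
    by_cases hs : s = []
    · simp [fsOuterA, hs, fsAltGo, ih]
    · have hne : (¬ s.isEmpty) = true := by simp [hs]
      by_cases hp : headers.any (fun h => ((PySem.Dict.mk s).get? h).isSome)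
      · simp [fsOuterA, hs, fsInnerA_eq, hp, List.filter_cons, hne, fsAltGo, fsOuterA_true]
      · simp [fsOuterA, hs, fsInnerA_eq, hp, List.filter_cons, hne, fsAltGo, ih]

-- ===== VERDICT (by name: the statement is the Claim_ definition above) =====
theorem form_seller_py_spec : Claim_equal_form_seller_py := by
  intro headers raw _
  unfold Spec_form_seller_py form_seller_py form_seller_py_alt
  rw [fsOuter_eq_go]
  exact (fsAlt_eq_go headers (raw.filter (fun s => ¬ s.isEmpty))).symm
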